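-- pv_equiv track=rewrite | github.com/clcert/psifos-backend-op | app/psifos/crypto/tally/mixnet/utils.py | is_invalid_ballot
-- ===== SOURCE A (Python) =====
-- def get_blank_id(total_closed_options):
--     return total_closed_options
--
-- def is_invalid_ballot(
--     ballot, total_closed_options, total_formal_options, max_len_ballot,
-- ):
--     if len(ballot) > max_len_ballot:
--         return True
--
--     blank_id = get_blank_id(total_closed_options)
--     for candidate in ballot:
--         is_formal = (
--             candidate in list(range(total_formal_options))
--             and ballot.count(candidate) == 1
--         )
--         is_blank = candidate == blank_id
--         is_valid = is_formal or is_blank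
--         if not is_valid:
--             return True
--     return False
-- ===== SOURCE B (Python) =====
-- def is_invalid_ballot(
--     ballot, total_closed_options, total_formal_options, max_len_ballot,
-- ):
--     if len(ballot) > max_len_ballot:
--         return True
--     formal = sorted(c for c in ballot if c != total_closed_options)
--     if not formal:
--         return False
--     if formal[0] < 0 or formal[-1] >= total_formal_options:
--         return True
--     return any(x == y for x, y in zip(formal, formal[1:]))
-- ===== Notes on version B (the rewrite author's own statement) =====
-- stated objective: alternative
-- what changed: A's per-candidate loop with an inner ballot.count() scan and a rebuilt range list is replaced by a sort-then-scan: sort the non-blank votes once, check the range via the smallest and largest element of the sorted list, and detect duplicates by comparing adjacent sorted elements.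
import Mathlib
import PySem

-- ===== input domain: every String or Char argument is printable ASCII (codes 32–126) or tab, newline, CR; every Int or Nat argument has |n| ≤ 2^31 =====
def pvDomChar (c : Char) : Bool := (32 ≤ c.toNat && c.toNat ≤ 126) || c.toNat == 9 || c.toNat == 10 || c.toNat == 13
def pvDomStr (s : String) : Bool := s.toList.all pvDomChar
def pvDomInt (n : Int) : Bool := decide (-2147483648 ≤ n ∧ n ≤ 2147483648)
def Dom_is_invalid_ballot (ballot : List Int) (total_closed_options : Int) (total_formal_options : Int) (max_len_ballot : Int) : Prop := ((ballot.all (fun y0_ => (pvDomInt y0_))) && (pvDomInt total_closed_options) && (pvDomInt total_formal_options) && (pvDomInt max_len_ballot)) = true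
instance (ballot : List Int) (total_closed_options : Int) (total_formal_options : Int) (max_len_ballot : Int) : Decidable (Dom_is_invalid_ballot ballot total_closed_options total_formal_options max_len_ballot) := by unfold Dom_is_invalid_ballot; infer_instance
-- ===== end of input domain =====

-- B replaces A's per-candidate loop (inner ballot.count scan, rebuilt range list) by a sort-then-scan:
-- sort the non-blank votes, check range via the first/last sorted element, find duplicates by comparing
-- adjacent sorted elements (objective: alternative; equivalence proved on all inputs).

-- ===== PORT A =====
def get_blank_id (total_closed_options : Int) : Int := total_closed_options

-- the 'for candidate in ballot: … return True / fall through' loop of A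
def pvALoop (ballot : List Int) (total_formal_options blank_id : Int) : List Int → Bool
  | [] => false
  | candidate :: rest =>
    let is_formal := (PySem.List.pyRange 0 total_formal_options 1).contains candidate
                      && (PySem.List.count ballot candidate == 1)
    let is_blank := candidate == blank_id
    let is_valid := is_formal || is_blank
    if !is_valid then true else pvALoop ballot total_formal_options blank_id rest

def is_invalid_ballot (ballot : List Int) (total_closed_options : Int) (total_formal_options : Int) (max_len_ballot : Int) : Bool :=
  if (ballot.length : Int) > max_len_ballot then true
  else pvALoop ballot total_formal_options (get_blank_id total_closed_options) ballot

-- ===== PORT B =====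
def is_invalid_ballot_alt (ballot : List Int) (total_closed_options : Int) (total_formal_options : Int) (max_len_ballot : Int) : Bool :=
  if (ballot.length : Int) > max_len_ballot then true
  else
    let formal := PySem.List.sorted (ballot.filter (fun c => c != total_closed_options)) (fun x => x) false
    if formal.isEmpty then false
    else if decide (formal.headD 0 < 0) || decide (formal.getLastD 0 ≥ total_formal_options) then true
    else (formal.zip formal.tail).any (fun p => p.1 == p.2)

-- ===== PRECONDITION & SPEC =====
def Spec_is_invalid_ballot (ballot : List Int) (total_closed_options : Int) (total_formal_options : Int) (max_len_ballot : Int) (out : Bool) : Prop := out = is_invalid_ballot_alt ballot total_closed_options total_formal_options max_len_ballot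
instance (ballot : List Int) (total_closed_options : Int) (total_formal_options : Int) (max_len_ballot : Int) (out : Bool) : Decidable (Spec_is_invalid_ballot ballot total_closed_options total_formal_options max_len_ballot out) := by unfold Spec_is_invalid_ballot; infer_instance

-- ===== CLAIM (what is proved, stated in full; the proofs are below) =====
def Claim_equal_is_invalid_ballot : Prop := ∀ (ballot : List Int) (total_closed_options : Int) (total_formal_options : Int) (max_len_ballot : Int), Dom_is_invalid_ballot ballot total_closed_options total_formal_options max_len_ballot → Spec_is_invalid_ballot ballot total_closed_options total_formal_options max_len_ballot (is_invalid_ballot ballot total_closed_options total_formal_options max_len_ballot)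

-- ===== LEMMAS AND PROOFS =====

-- A's loop returns true iff some candidate in the suffix fails A's validity test
lemma pvALoop_eq_any (ballot : List Int) (tfo b : Int) (l : List Int) :
    pvALoop ballot tfo b l
      = l.any (fun c => !(((PySem.List.pyRange 0 tfo 1).contains c
                            && (PySem.List.count ballot c == 1)) || (c == b))) := by
  induction l with
  | nil => rfl
  | cons c rest ih =>
    simp only [pvALoop, List.any_cons, ih]
    cases hv : ((PySem.List.pyRange 0 tfo 1).contains c
        && (PySem.List.count ballot c == 1)) || (c == b) <;>
      simp

-- count in the filtered list equals count in the full ballot for non-blank values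
lemma count_filter_ne (ballot : List Int) (b c : Int) (hc : c ≠ b) :
    (ballot.filter (fun x => x != b)).count c = ballot.count c := by
  rw [List.count_filter]
  simp [hc]

-- validity of every candidate (A's phrasing) ↔ range check plus no-duplicates on the filtered list
lemma all_valid_iff (ballot : List Int) (tco tfo : Int) :
    (∀ c ∈ ballot, ((0 ≤ c ∧ c < tfo) ∧ ballot.count c = 1) ∨ c = tco)
      ↔ ((∀ c ∈ ballot.filter (fun x => x != tco), 0 ≤ c ∧ c < tfo)
          ∧ (ballot.filter (fun x => x != tco)).Nodup) := by
  constructor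
  · intro h
    constructor
    · intro c hc
      have hmem := List.mem_filter.1 hc
      have hne : c ≠ tco := by simpa using hmem.2
      rcases h c hmem.1 with ⟨hr, _⟩ | rfl
      · exact hr
      · exact absurd rfl hne
    · rw [List.nodup_iff_count_le_one]
      intro a
      by_cases ha : a ∈ ballot.filter (fun x => x != tco)
      · have hmem := List.mem_filter.1 ha
        have hne : a ≠ tco := by simpa using hmem.2
        rcases h a hmem.1 with ⟨_, hcnt⟩ | rfl
        · rw [count_filter_ne ballot tco a hne, hcnt]
        · exact absurd rfl hne
      · simp [List.count_eq_zero_of_not_mem ha]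
  · rintro ⟨hr, hnd⟩ c hc
    by_cases hb : c = tco
    · exact Or.inr hb
    · left
      have hcf : c ∈ ballot.filter (fun x => x != tco) :=
        List.mem_filter.2 ⟨hc, by simpa using hb⟩
      refine ⟨hr c hcf, ?_⟩
      rw [← count_filter_ne ballot tco c hb]
      have h1 := (List.nodup_iff_count_le_one.1 hnd) c
      have h2 := List.count_pos_iff.2 hcf
      omega

-- on a ≤-sorted list, some adjacent pair is equal iff the list has a duplicate
lemma any_adjacent_eq (s : List Int) (h : s.Pairwise (· ≤ ·)) :
    (s.zip s.tail).any (fun p => p.1 == p.2) = !decide s.Nodup := by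
  induction s with
  | nil => simp
  | cons a t ih =>
    cases t with
    | nil => simp
    | cons b u =>
      have hpw := h
      rw [List.pairwise_cons] at hpw
      obtain ⟨hab, hrest⟩ := hpw
      have hab' : a ≤ b := hab b (by simp)
      by_cases heq : a = b
      · subst heq
        simp
      · have hnotmem : a ∉ b :: u := by
          intro hm
          rcases List.mem_cons.1 hm with rfl | hmu
          · exact heq rfl
          · have hbu : b ≤ a := by
              rw [List.pairwise_cons] at hrest
              exact hrest.1 a hmu
            exact heq (le_antisymm hab' hbu)
        have := ih hrest
        simp only [List.tail_cons, List.zip_cons_cons, List.any_cons] at *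
        rw [this]
        simp [heq, hnotmem]

-- on a ≤-sorted non-empty list, every element is ≤ the last element
lemma le_getLastD_of_pairwise (l : List Int) (a : Int) (h : l.Pairwise (· ≤ ·)) :
    ∀ c ∈ l, c ≤ l.getLastD a := by
  induction l generalizing a with
  | nil => simp
  | cons x xs ih =>
    intro c hc
    rw [List.getLastD_cons]
    rw [List.pairwise_cons] at h
    rcases List.mem_cons.1 hc with rfl | hcx
    · have hm : xs.getLastD c ∈ c :: xs := List.getLastD_mem_cons
      rcases List.mem_cons.1 hm with he | hin
      · omega
      · exact h.1 _ hin
    · exact ih x h.2 c hcx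

-- B's else-branch computes "not (range check and no duplicates)" on the filtered list
lemma B_branch_char (f : List Int) (tfo : Int) :
    (let s := PySem.List.sorted f (fun x => x) false;
     if s.isEmpty then false
     else if decide (s.headD 0 < 0) || decide (s.getLastD 0 ≥ tfo) then true
     else (s.zip s.tail).any (fun p => p.1 == p.2))
      = !decide ((∀ c ∈ f, 0 ≤ c ∧ c < tfo) ∧ f.Nodup) := by
  have hperm : (PySem.List.sorted f (fun x => x) false).Perm f := PySem.List.sorted_perm f _ _
  have hpw : (PySem.List.sorted f (fun x => x) false).Pairwise (· ≤ ·) :=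
    PySem.List.sorted_pairwise f (fun x => x)
  set s := PySem.List.sorted f (fun x => x) false with hs
  cases hcase : s with
  | nil =>
    have hf : f = [] := by
      have := hperm; rw [hcase] at this; exact this.symm.eq_nil
    simp [hf]
  | cons m t =>
    have hpw' : (m :: t).Pairwise (· ≤ ·) := by rw [← hcase]; exact hpw
    have hmem' : ∀ c, c ∈ m :: t ↔ c ∈ f := by
      intro c; rw [← hcase]; exact hperm.mem_iff
    have hnd' : (m :: t).Nodup ↔ f.Nodup := by rw [← hcase]; exact hperm.nodup_iff
    have hlastmem : (m :: t).getLastD 0 ∈ m :: t := by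
      rw [List.getLastD_cons]; exact List.getLastD_mem_cons
    simp only [List.isEmpty_cons, Bool.false_eq_true, if_false, List.headD_cons]
    by_cases hc : m < 0 ∨ (m :: t).getLastD 0 ≥ tfo
    · have hbad : ¬ (∀ c ∈ f, 0 ≤ c ∧ c < tfo) := by
        rcases hc with hlo | hhi
        · intro hall; have := (hall m ((hmem' m).1 (by simp))).1; omega
        · intro hall; have := (hall _ ((hmem' _).1 hlastmem)).2; omega
      rw [if_pos (by simp only [Bool.or_eq_true, decide_eq_true_eq,
        ← List.getLastD_eq_getLast?]; omega)]
      simp [hbad]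
    · push_neg at hc
      obtain ⟨hlo, hhi⟩ := hc
      have hrange : ∀ c ∈ f, 0 ≤ c ∧ c < tfo := by
        intro c hcf
        have hcs : c ∈ m :: t := (hmem' c).2 hcf
        have hlow : m ≤ c := by
          rcases List.mem_cons.1 hcs with rfl | hct
          · omega
          · exact (List.pairwise_cons.1 hpw').1 c hct
        have hhigh : c ≤ (m :: t).getLastD 0 :=
          le_getLastD_of_pairwise (m :: t) 0 hpw' c hcs
        omega
      rw [if_neg (by simp only [Bool.or_eq_true, decide_eq_true_eq,
        ← List.getLastD_eq_getLast?]; omega)]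
      rw [any_adjacent_eq (m :: t) hpw']
      rw [decide_eq_decide.mpr hnd',
        decide_eq_decide.mpr (show f.Nodup ↔ ((∀ c ∈ f, 0 ≤ c ∧ c < tfo) ∧ f.Nodup) from
          ⟨fun h => ⟨hrange, h⟩, fun h => h.2⟩)]
      infer_instance

-- ===== VERDICT (by name: the statement is the Claim_ definition above) =====
theorem is_invalid_ballot_spec : Claim_equal_is_invalid_ballot := by
  intro ballot tco tfo mlb _
  unfold Spec_is_invalid_ballot is_invalid_ballot is_invalid_ballot_alt get_blank_id
  by_cases hlen : (ballot.length : Int) > mlb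
  · simp [hlen]
  · rw [if_neg hlen, if_neg hlen, pvALoop_eq_any, B_branch_char]
    rw [← decide_eq_decide.mpr (all_valid_iff ballot tco tfo)]
    have hpt : ∀ c : Int,
        (!(((PySem.List.pyRange 0 tfo 1).contains c
              && (PySem.List.count ballot c == 1)) || (c == tco)))
          = !decide ((((0 ≤ c ∧ c < tfo) ∧ ballot.count c = 1) ∨ c = tco)) := by
      intro c
      congr 1
      rw [Bool.eq_iff_iff]
      simp [List.contains_eq_mem, PySem.List.mem_pyRange_one, PySem.List.count_eq]
    simp only [hpt]
    rw [Bool.eq_iff_iff]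
    simp only [List.any_eq_true, Bool.not_eq_true', decide_eq_false_iff_not,
      Bool.not_eq_true]
    constructor
    · rintro ⟨c, hc, h⟩ hall
      exact h (hall c hc)
    · intro h
      rcases not_forall.1 h with ⟨c, hc⟩
      rw [Classical.not_imp] at hc
      exact ⟨c, hc.1, hc.2⟩
    · infer_instance
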